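-- pv_equiv track=rewrite | github.com/athifer/biodsjobs | backend/create_master_lookup.py | determine_best_source
-- ===== SOURCE A (Python) =====
-- def determine_best_source(company_info):
--     """Determine the best source for a company"""
--     sources = list(company_info['sources'])
--     if not sources:
--         return 'unknown'
--
--     # Preference order for sources
--     source_preferences = ['greenhouse', 'lever', 'workday', 'comprehensive', 'talentbrew', 'bamboo', 'ycombinator', 'angellist']
--
--     for preference in source_preferences:
--         if preference in sources:
--             return preference
--
--     return sources[0]
-- ===== SOURCE B (Python) =====
-- def determine_best_source(company_info):
--     """Determine the best source for a company"""
--     # Preference order for sources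
--     source_preferences = ['greenhouse', 'lever', 'workday', 'comprehensive', 'talentbrew', 'bamboo', 'ycombinator', 'angellist']
--
--     # single pass over the sources with a running best (source, rank) accumulator;
--     # strict '<' keeps the FIRST source achieving the minimal rank, so with no
--     # preferred source the first source wins, reproducing A's sources[0] fallback.
--     best = None
--     best_rank = len(source_preferences) + 1
--     for source in company_info['sources']:
--         try:
--             rank = source_preferences.index(source)
--         except ValueError:
--             rank = len(source_preferences)
--         if rank < best_rank:
--             best, best_rank = source, rank
--     return best if best is not None else 'unknown'
-- ===== Notes on version B (the rewrite author's own statement) =====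
-- stated objective: alternative
-- what changed: Replaced A's scan over the preference list (a membership test per preference, plus a separate empty check and sources[0] fallback) by a single left-to-right pass over the sources with a running best (source, rank) accumulator; the empty case and the fallback both come out of the same loop.
import Mathlib
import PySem

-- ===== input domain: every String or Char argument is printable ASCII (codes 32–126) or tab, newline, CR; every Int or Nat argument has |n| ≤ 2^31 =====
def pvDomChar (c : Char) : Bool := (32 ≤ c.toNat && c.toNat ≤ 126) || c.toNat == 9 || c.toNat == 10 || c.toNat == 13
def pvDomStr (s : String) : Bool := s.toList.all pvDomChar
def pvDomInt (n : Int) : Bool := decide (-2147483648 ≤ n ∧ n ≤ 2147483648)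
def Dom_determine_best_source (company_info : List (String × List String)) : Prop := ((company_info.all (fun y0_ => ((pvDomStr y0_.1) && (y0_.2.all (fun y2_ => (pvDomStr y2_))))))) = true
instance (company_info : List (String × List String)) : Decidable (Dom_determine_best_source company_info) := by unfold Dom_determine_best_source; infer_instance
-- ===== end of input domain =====

-- B replaces A's scan over the preference list by one pass over the sources with a running best (source, rank) accumulator (alternative decomposition; same return values).


-- ===== PORT A =====
def pvSourcePreferences : List String :=
  ["greenhouse", "lever", "workday", "comprehensive", "talentbrew", "bamboo", "ycombinator", "angellist"]

def determine_best_source (company_info : List (String × List String)) : String :=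
  match (PySem.Dict.mk company_info).get? "sources" with
  | none => ""  -- KeyError: excluded by Pre_
  | some sources =>
    if sources = [] then "unknown"
    else
      -- for preference in source_preferences: if preference in sources: return preference
      match pvSourcePreferences.find? (fun p => sources.contains p) with
      | some p => p
      | none => PySem.List.pyGetD sources 0 ""

-- ===== PORT B =====
-- try: rank = source_preferences.index(source) except ValueError: rank = len(source_preferences)
def pvRankOf (s : String) : Int :=
  match PySem.List.index? pvSourcePreferences s with
  | some i => (i : Int)
  | none => 8

-- the for-loop: running (best, best_rank) accumulator
def pvBestLoop : List String → Option String × Int → Option String × Int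
  | [], acc => acc
  | source :: rest, (best, best_rank) =>
      let rank := pvRankOf source
      if rank < best_rank then pvBestLoop rest (some source, rank)
      else pvBestLoop rest (best, best_rank)

def determine_best_source_alt (company_info : List (String × List String)) : String :=
  let sources := match (PySem.Dict.mk company_info).get? "sources" with
    | none => []  -- KeyError: excluded by Pre_
    | some xs => xs
  match (pvBestLoop sources (none, 9)).1 with
  | some best => best
  | none => "unknown"

-- ===== PRECONDITION & SPEC =====
-- Pre_ excludes exactly the inputs where company_info['sources'] raises KeyError (both A and B raise there).
def Pre_determine_best_source (company_info : List (String × List String)) : Prop :=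
  (PySem.Dict.mk company_info).contains "sources" = true
instance (company_info : List (String × List String)) : Decidable (Pre_determine_best_source company_info) := by unfold Pre_determine_best_source; infer_instance

def pvWitness_determine_best_source : (List (String × List String)) := [("sources", ["acme", "lever"])]

def Spec_determine_best_source (company_info : List (String × List String)) (out : String) : Prop := out = determine_best_source_alt company_info
instance (company_info : List (String × List String)) (out : String) : Decidable (Spec_determine_best_source company_info out) := by unfold Spec_determine_best_source; infer_instance

-- ===== CLAIM (what is proved, stated in full; the proofs are below) =====
def Claim_equal_determine_best_source : Prop := ∀ (company_info : List (String × List String)), Dom_determine_best_source company_info → Pre_determine_best_source company_info → Spec_determine_best_source company_info (determine_best_source company_info)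

-- ===== LEMMAS AND PROOFS =====

-- B's rank, evaluated as an if-chain
lemma pvRankOf_eval (s : String) : pvRankOf s =
    if s = "greenhouse" then 0 else if s = "lever" then 1 else if s = "workday" then 2
    else if s = "comprehensive" then 3 else if s = "talentbrew" then 4 else if s = "bamboo" then 5
    else if s = "ycombinator" then 6 else if s = "angellist" then 7 else 8 := by
  by_cases h1 : s = "greenhouse"; · subst h1; decide
  by_cases h2 : s = "lever"; · subst h2; decide
  by_cases h3 : s = "workday"; · subst h3; decide
  by_cases h4 : s = "comprehensive"; · subst h4; decide
  by_cases h5 : s = "talentbrew"; · subst h5; decide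
  by_cases h6 : s = "bamboo"; · subst h6; decide
  by_cases h7 : s = "ycombinator"; · subst h7; decide
  by_cases h8 : s = "angellist"; · subst h8; decide
  have hnm : s ∉ pvSourcePreferences := by
    simp [pvSourcePreferences, h1, h2, h3, h4, h5, h6, h7, h8]
  rw [pvRankOf, (PySem.List.index?_eq_none_iff _ _).mpr hnm]
  simp [h1, h2, h3, h4, h5, h6, h7, h8]

lemma pvRankOf_le_eight (s : String) : pvRankOf s ≤ 8 := by
  rw [pvRankOf_eval]; split_ifs <;> omega

-- python's min(sources, key=rank) computes the same running best as the loop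
lemma pvMin_eq_loop (t : List String) (m : String) :
    PySem.List.min? (m :: t) pvRankOf = (pvBestLoop t (some m, pvRankOf m)).1 := by
  induction t generalizing m with
  | nil => rfl
  | cons y u ih =>
    show PySem.List.min? (m :: y :: u) pvRankOf =
      (if pvRankOf y < pvRankOf m then pvBestLoop u (some y, pvRankOf y)
       else pvBestLoop u (some m, pvRankOf m)).1
    by_cases h : pvRankOf y < pvRankOf m
    · rw [if_pos h, ← ih y]
      unfold PySem.List.min?
      simp only [List.foldl_cons]
      congr 1
      show (if pvRankOf y < pvRankOf m then some y else some m) = some y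
      exact if_pos h
    · rw [if_neg h, ← ih m]
      unfold PySem.List.min?
      simp only [List.foldl_cons]
      congr 1
      show (if pvRankOf y < pvRankOf m then some y else some m) = some m
      exact if_neg h

-- starting from (None, 9) the loop computes min(sources, key=rank)
lemma pvBestLoop_eq_min? (sources : List String) :
    (pvBestLoop sources (none, 9)).1 = PySem.List.min? sources pvRankOf := by
  cases sources with
  | nil => rfl
  | cons s t =>
    show (if pvRankOf s < 9 then pvBestLoop t (some s, pvRankOf s)
          else pvBestLoop t (none, 9)).1 = _
    rw [if_pos (by have := pvRankOf_le_eight s; omega), pvMin_eq_loop]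

-- the loop keeps its best when no later element has a strictly smaller rank
lemma pvLoopKeep (t : List String) (m : String)
    (h : ∀ y ∈ t, ¬ pvRankOf y < pvRankOf m) :
    (pvBestLoop t (some m, pvRankOf m)).1 = some m := by
  induction t with
  | nil => rfl
  | cons y u ih =>
    show (if pvRankOf y < pvRankOf m then pvBestLoop u (some y, pvRankOf y)
          else pvBestLoop u (some m, pvRankOf m)).1 = some m
    rw [if_neg (h y (by simp))]
    exact ih (fun z hz => h z (by simp [hz]))

-- core equivalence on a nonempty source list
set_option maxHeartbeats 2000000 in
lemma pvCore (sources : List String) (hne : sources ≠ []) :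
    (match pvSourcePreferences.find? (fun p => sources.contains p) with
     | some p => p
     | none => PySem.List.pyGetD sources 0 "") =
    (match (pvBestLoop sources (none, 9)).1 with
     | some m => m
     | none => "unknown") := by
  rw [pvBestLoop_eq_min?]
  cases hm : PySem.List.min? sources pvRankOf with
  | none => exact absurd ((PySem.List.min?_eq_none_iff _ _).mp hm) hne
  | some m =>
    have hmem : m ∈ sources := PySem.List.min?_mem hm
    have hmin := PySem.List.min?_isMin hm
    by_cases h1 : "greenhouse" ∈ sources
    · have hle : pvRankOf m ≤ pvRankOf "greenhouse" := hmin _ h1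
      rw [(by decide : pvRankOf "greenhouse" = (0:Int))] at hle
      rw [pvRankOf_eval] at hle
      have hf : pvSourcePreferences.find? (fun p => sources.contains p) = some "greenhouse" := by
        simp [pvSourcePreferences, h1]
      simp only [hf]
      split_ifs at hle <;> first | omega | simp_all
    by_cases h2 : "lever" ∈ sources
    · have hle : pvRankOf m ≤ pvRankOf "lever" := hmin _ h2
      rw [(by decide : pvRankOf "lever" = (1:Int))] at hle
      rw [pvRankOf_eval] at hle
      have hf : pvSourcePreferences.find? (fun p => sources.contains p) = some "lever" := by
        simp [pvSourcePreferences, h1, h2]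
      simp only [hf]
      split_ifs at hle <;> first | omega | simp_all
    by_cases h3 : "workday" ∈ sources
    · have hle : pvRankOf m ≤ pvRankOf "workday" := hmin _ h3
      rw [(by decide : pvRankOf "workday" = (2:Int))] at hle
      rw [pvRankOf_eval] at hle
      have hf : pvSourcePreferences.find? (fun p => sources.contains p) = some "workday" := by
        simp [pvSourcePreferences, h1, h2, h3]
      simp only [hf]
      split_ifs at hle <;> first | omega | simp_all
    by_cases h4 : "comprehensive" ∈ sources
    · have hle : pvRankOf m ≤ pvRankOf "comprehensive" := hmin _ h4
      rw [(by decide : pvRankOf "comprehensive" = (3:Int))] at hle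
      rw [pvRankOf_eval] at hle
      have hf : pvSourcePreferences.find? (fun p => sources.contains p) = some "comprehensive" := by
        simp [pvSourcePreferences, h1, h2, h3, h4]
      simp only [hf]
      split_ifs at hle <;> first | omega | simp_all
    by_cases h5 : "talentbrew" ∈ sources
    · have hle : pvRankOf m ≤ pvRankOf "talentbrew" := hmin _ h5
      rw [(by decide : pvRankOf "talentbrew" = (4:Int))] at hle
      rw [pvRankOf_eval] at hle
      have hf : pvSourcePreferences.find? (fun p => sources.contains p) = some "talentbrew" := by
        simp [pvSourcePreferences, h1, h2, h3, h4, h5]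
      simp only [hf]
      split_ifs at hle <;> first | omega | simp_all
    by_cases h6 : "bamboo" ∈ sources
    · have hle : pvRankOf m ≤ pvRankOf "bamboo" := hmin _ h6
      rw [(by decide : pvRankOf "bamboo" = (5:Int))] at hle
      rw [pvRankOf_eval] at hle
      have hf : pvSourcePreferences.find? (fun p => sources.contains p) = some "bamboo" := by
        simp [pvSourcePreferences, h1, h2, h3, h4, h5, h6]
      simp only [hf]
      split_ifs at hle <;> first | omega | simp_all
    by_cases h7 : "ycombinator" ∈ sources
    · have hle : pvRankOf m ≤ pvRankOf "ycombinator" := hmin _ h7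
      rw [(by decide : pvRankOf "ycombinator" = (6:Int))] at hle
      rw [pvRankOf_eval] at hle
      have hf : pvSourcePreferences.find? (fun p => sources.contains p) = some "ycombinator" := by
        simp [pvSourcePreferences, h1, h2, h3, h4, h5, h6, h7]
      simp only [hf]
      split_ifs at hle <;> first | omega | simp_all
    by_cases h8 : "angellist" ∈ sources
    · have hle : pvRankOf m ≤ pvRankOf "angellist" := hmin _ h8
      rw [(by decide : pvRankOf "angellist" = (7:Int))] at hle
      rw [pvRankOf_eval] at hle
      have hf : pvSourcePreferences.find? (fun p => sources.contains p) = some "angellist" := by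
        simp [pvSourcePreferences, h1, h2, h3, h4, h5, h6, h7, h8]
      simp only [hf]
      split_ifs at hle <;> first | omega | simp_all
    -- no preferred source at all: all ranks tie at 8 and the loop keeps the head = sources[0]
    · have hall : ∀ y ∈ sources, pvRankOf y = 8 := by
        intro y hy
        rw [pvRankOf_eval]
        split_ifs <;> simp_all
      have hf : pvSourcePreferences.find? (fun p => sources.contains p) = none := by
        simp [pvSourcePreferences, h1, h2, h3, h4, h5, h6, h7, h8]
      simp only [hf]
      cases sources with
      | nil => exact absurd rfl hne
      | cons x t =>
        have hm' : PySem.List.min? (x :: t) pvRankOf = some x := by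
          rw [pvMin_eq_loop]
          exact pvLoopKeep t x fun y hy => by
            rw [hall y (List.mem_cons_of_mem x hy), hall x List.mem_cons_self]; omega
        rw [hm'] at hm
        injection hm with hmx
        subst hmx
        simp [PySem.List.pyGetD_zero_cons]

-- ===== VERDICT (by name: the statement is the Claim_ definition above) =====
theorem determine_best_source_spec : Claim_equal_determine_best_source := by
  intro ci _ hpre
  unfold Spec_determine_best_source determine_best_source determine_best_source_alt
  cases hsrc : (PySem.Dict.mk ci).get? "sources" with
  | none =>
    exact absurd hpre (by
      unfold Pre_determine_best_source
      rw [PySem.Dict.contains_eq_isSome_get?, hsrc]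
      simp)
  | some sources =>
    by_cases he : sources = []
    · simp [he, pvBestLoop]
    · simp only [if_neg he]
      exact pvCore sources he
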